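-- pv_equiv track=rewrite | github.com/casanccs/Portfolio | Python/Network Programming with Pygame/Infected/main.py | stringList_to_list
-- ===== SOURCE A (Python) =====
-- def stringList_to_list(stringList,n): #m is number of rows, n is number of columns, only works when the numbers are 0 <= i <= 9, and all rows have same number of columns
--     newList = []
--     temp = []
--     j = 0 #iterator for current index of column
--     for k, el in enumerate(stringList):
--         if el in ['0','1','2','3','4','5','6','7','8','9']:
--             temp.append(int(el))
--             j += 1
--             if j == n: #this means we need to start adding to the next row
--                 j = 0
--                 newList.append(temp)
--                 temp = []
--     return newList
-- ===== SOURCE B (Python) =====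
-- def stringList_to_list(stringList, n):
--     # flatten-then-chunk: collect all digits once, then cut complete rows of n
--     digits = [int(el) for el in stringList
--               if el in ['0','1','2','3','4','5','6','7','8','9']]
--     if n <= 0:
--         return []
--     return [digits[i*n:(i+1)*n] for i in range(len(digits)//n)]
-- ===== Notes on version B (the rewrite author's own statement) =====
-- stated objective: simpler
-- what changed: Replaces A's single stateful pass with a column counter and mutable row buffer by a two-step flatten-then-chunk: first filter/convert all digits, then slice complete rows of n with a comprehension.
import Mathlib
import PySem

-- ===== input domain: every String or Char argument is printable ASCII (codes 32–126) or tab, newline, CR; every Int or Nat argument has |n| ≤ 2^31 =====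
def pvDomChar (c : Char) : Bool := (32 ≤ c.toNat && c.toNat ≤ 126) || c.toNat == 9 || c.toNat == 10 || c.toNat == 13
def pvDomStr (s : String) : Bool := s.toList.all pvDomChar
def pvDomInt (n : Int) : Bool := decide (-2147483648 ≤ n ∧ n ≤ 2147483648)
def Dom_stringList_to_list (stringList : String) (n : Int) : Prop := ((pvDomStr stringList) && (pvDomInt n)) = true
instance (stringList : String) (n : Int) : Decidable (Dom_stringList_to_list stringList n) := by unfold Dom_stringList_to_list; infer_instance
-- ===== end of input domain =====

-- B replaces A's single stateful column-counter pass by flatten-then-chunk (simpler decomposition; same cost).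


-- ===== PORT A =====
-- the digit literal list ['0',…,'9'] from the Python source
def pvDigits : List Char := ['0','1','2','3','4','5','6','7','8','9']
-- int(el) for a character that is one of pvDigits (exact there)
def pvDigitVal (c : Char) : Int := (c.toNat : Int) - 48
-- one iteration of A's for-loop body; state = (newList, temp, j)  (the enumerate index k is unused by A)
def pvStepA (n : Int) (st : List (List Int) × List Int × Int) (el : Char) :
    List (List Int) × List Int × Int :=
  if el ∈ pvDigits then
    let temp := st.2.1 ++ [pvDigitVal el]
    let j := st.2.2 + 1
    if j = n then (st.1 ++ [temp], [], 0) else (st.1, temp, j)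
  else st

def stringList_to_list (stringList : String) (n : Int) : List (List Int) :=
  (stringList.toList.foldl (pvStepA n) ([], [], 0)).1

-- ===== PORT B =====
def stringList_to_list_alt (stringList : String) (n : Int) : List (List Int) :=
  let digits := (stringList.toList.filter (· ∈ pvDigits)).map pvDigitVal
  if n ≤ 0 then []
  else (PySem.List.pyRange 0 (PySem.Int.floordiv (digits.length : Int) n) 1).map
        (fun i => PySem.List.slice digits (some (i * n)) (some ((i + 1) * n)))

-- ===== PRECONDITION & SPEC =====
def Spec_stringList_to_list (stringList : String) (n : Int) (out : List (List Int)) : Prop := out = stringList_to_list_alt stringList n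
instance (stringList : String) (n : Int) (out : List (List Int)) : Decidable (Spec_stringList_to_list stringList n out) := by unfold Spec_stringList_to_list; infer_instance

-- ===== CLAIM (what is proved, stated in full; the proofs are below) =====
def Claim_equal_stringList_to_list : Prop := ∀ (stringList : String) (n : Int), Dom_stringList_to_list stringList n → Spec_stringList_to_list stringList n (stringList_to_list stringList n)

-- ===== LEMMAS AND PROOFS =====

-- the common value both programs compute for n > 0: rows of N digits, incomplete tail dropped
def pvChunks (N : Nat) (ds : List Int) : List (List Int) :=
  if _h : 0 < N ∧ N ≤ ds.length then (ds.take N) :: pvChunks N (ds.drop N) else []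
termination_by ds.length
decreasing_by simp; omega

-- A's step on the digit stream only (non-digit chars leave the state unchanged)
def pvStepD (n : Int) (st : List (List Int) × List Int × Int) (d : Int) :
    List (List Int) × List Int × Int :=
  let temp := st.2.1 ++ [d]
  let j := st.2.2 + 1
  if j = n then (st.1 ++ [temp], [], 0) else (st.1, temp, j)

theorem foldA_eq_foldD (n : Int) (cs : List Char) (st : List (List Int) × List Int × Int) :
    cs.foldl (pvStepA n) st = ((cs.filter (· ∈ pvDigits)).map pvDigitVal).foldl (pvStepD n) st := by
  induction cs generalizing st with
  | nil => rfl
  | cons c cs ih =>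
      by_cases h : c ∈ pvDigits <;>
        simp [pvStepA, pvStepD, h, ih]

theorem foldD_nonpos (n : Int) (hn : n ≤ 0) (ds : List Int)
    (acc : List (List Int)) (temp : List Int) :
    (ds.foldl (pvStepD n) (acc, temp, (temp.length : Int))).1 = acc := by
  induction ds generalizing acc temp with
  | nil => rfl
  | cons d ds ih =>
      have hne : (temp.length : Int) + 1 ≠ n := by omega
      have : pvStepD n (acc, temp, (temp.length : Int)) d
          = (acc, temp ++ [d], ((temp ++ [d]).length : Int)) := by
        simp [pvStepD, hne]
      simp only [List.foldl_cons, this]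
      exact ih acc (temp ++ [d])

theorem foldD_pos (n : Int) (hn : 0 < n) (ds : List Int)
    (acc : List (List Int)) (temp : List Int) (ht : temp.length < n.toNat) :
    (ds.foldl (pvStepD n) (acc, temp, (temp.length : Int))).1
      = acc ++ pvChunks n.toNat (temp ++ ds) := by
  induction ds generalizing acc temp with
  | nil =>
      rw [pvChunks]
      have hneg : ¬ (0 < n.toNat ∧ n.toNat ≤ (temp ++ ([] : List Int)).length) := by
        simp only [List.append_nil]; omega
      rw [dif_neg hneg]
      simp
  | cons d ds ih =>
      by_cases hfull : (temp.length : Int) + 1 = n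
      · have hlen : (temp ++ [d]).length = n.toNat := by simp; omega
        have hstep : pvStepD n (acc, temp, (temp.length : Int)) d
            = (acc ++ [temp ++ [d]], [], (([] : List Int).length : Int)) := by
          simp [pvStepD, hfull]
        simp only [List.foldl_cons, hstep]
        rw [ih (acc ++ [temp ++ [d]]) [] (by simp; omega)]
        have key : pvChunks n.toNat (temp ++ d :: ds) = (temp ++ [d]) :: pvChunks n.toNat ds := by
          rw [pvChunks]
          have hc : 0 < n.toNat ∧ n.toNat ≤ (temp ++ d :: ds).length := by
            simp at hlen ⊢; omega
          rw [dif_pos hc]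
          have heq : temp ++ d :: ds = (temp ++ [d]) ++ ds := by simp
          rw [heq, ← hlen, List.take_left, List.drop_left]
        rw [key]
        simp
      · have hstep : pvStepD n (acc, temp, (temp.length : Int)) d
            = (acc, temp ++ [d], (((temp ++ [d]).length : Nat) : Int)) := by
          simp [pvStepD, hfull]
        simp only [List.foldl_cons, hstep]
        have hlt : (temp ++ [d]).length < n.toNat := by simp; omega
        rw [ih acc (temp ++ [d]) hlt]
        simp

-- B computes pvChunks: drop/take chunking of the whole digit list
theorem chunk_map (N : Nat) (hN : 0 < N) :
    ∀ (m : Nat) (ds : List Int), ds.length ≤ m →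
      (List.range (ds.length / N)).map (fun j => (ds.drop (j * N)).take N) = pvChunks N ds := by
  intro m
  induction m with
  | zero =>
      intro ds h
      have : ds = [] := List.eq_nil_of_length_eq_zero (by omega)
      subst this
      rw [pvChunks]
      have hneg : ¬ (0 < N ∧ N ≤ ([] : List Int).length) := by simp; omega
      rw [dif_neg hneg]
      simp
  | succ m ih =>
      intro ds h
      by_cases hle : N ≤ ds.length
      · have hdiv : ds.length / N = (ds.drop N).length / N + 1 := by
          rw [List.length_drop]
          exact Nat.div_eq_sub_div hN hle
        rw [hdiv, List.range_succ_eq_map, List.map_cons, List.map_map]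
        rw [pvChunks]
        simp only [hN, hle, and_self, dif_pos]
        congr 1
        · simp
        · rw [← ih (ds.drop N) (by simp; omega)]
          apply List.map_congr_left
          intro j _
          simp [Nat.succ_mul, List.drop_drop, Nat.add_comm (j*N) N]
      · have : ds.length / N = 0 := Nat.div_eq_of_lt (by omega)
        rw [this, pvChunks]
        have : ¬ (0 < N ∧ N ≤ ds.length) := by omega
        simp [this]

theorem alt_eq_chunks (stringList : String) (n : Int) (hn : 0 < n) :
    stringList_to_list_alt stringList n
      = pvChunks n.toNat ((stringList.toList.filter (· ∈ pvDigits)).map pvDigitVal) := by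
  unfold stringList_to_list_alt
  set ds := (stringList.toList.filter (· ∈ pvDigits)).map pvDigitVal with hds
  have hn' : ¬ n ≤ 0 := by omega
  simp only [hn', if_false]
  have hcast : n = ((n.toNat : Nat) : Int) := by omega
  rw [hcast, PySem.Int.floordiv_natCast, PySem.List.pyRange_one, List.map_map]
  simp only [Int.toNat_natCast, sub_zero]
  rw [← chunk_map n.toNat (by omega) ds.length ds le_rfl]
  apply List.map_congr_left
  intro j _
  simp only [Function.comp_apply]
  have e1 : ((0 : Int) + (j : Int)) * ((n.toNat : Nat) : Int) = (((j * n.toNat : Nat)) : Int) := by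
    push_cast; ring
  have e2 : ((0 : Int) + (j : Int) + 1) * ((n.toNat : Nat) : Int)
      = (((j * n.toNat + n.toNat : Nat)) : Int) := by push_cast; ring
  rw [e1, e2, PySem.List.slice_natCast]
  congr 1
  omega

-- ===== VERDICT (by name: the statement is the Claim_ definition above) =====
theorem stringList_to_list_spec : Claim_equal_stringList_to_list := by
  intro s n _
  unfold Spec_stringList_to_list stringList_to_list
  rw [foldA_eq_foldD]
  by_cases hn : n ≤ 0
  · have := foldD_nonpos n hn ((s.toList.filter (· ∈ pvDigits)).map pvDigitVal) [] []
    simp only [List.length_nil, Nat.cast_zero] at this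
    rw [this]
    unfold stringList_to_list_alt
    simp [hn]
  · have hn' : 0 < n := by omega
    have := foldD_pos n hn' ((s.toList.filter (· ∈ pvDigits)).map pvDigitVal) [] []
      (by simp; omega)
    simp only [List.length_nil, Nat.cast_zero] at this
    rw [this, alt_eq_chunks s n hn']
    simp
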